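-- pv_equiv track=rewrite | github.com/Grant-Huang/docs2md | backend/converters/pdf_converter.py | _text_to_md
-- ===== SOURCE A (Python) =====
-- def _text_to_md(text: str, page_num: int) -> str:
--     """将页面纯文本格式化为 Markdown（保留段落结构）"""
--     lines = text.splitlines()
--     # 过滤空行并合并段落
--     cleaned = []
--     for line in lines:
--         stripped = line.strip()
--         if stripped:
--             cleaned.append(stripped)
--         elif cleaned and cleaned[-1] != "":
--             cleaned.append("")
--     body = "\n".join(cleaned).strip()
--     return f"## 第 {page_num} 页\n\n{body}"
-- ===== SOURCE B (Python) =====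
-- def _text_to_md(text: str, page_num: int) -> str:
--     lines = [l.strip() for l in text.splitlines()]
--     blocks = []
--     i = 0
--     n = len(lines)
--     while i < n:
--         if lines[i] == "":
--             i += 1
--             continue
--         j = i
--         while j < n and lines[j] != "":
--             j += 1
--         blocks.append("\n".join(lines[i:j]))
--         i = j
--     return f"## 第 {page_num} 页\n\n" + "\n\n".join(blocks)
-- ===== Notes on version B (the rewrite author's own statement) =====
-- stated objective: alternative
-- what changed: A is a one-pass state machine that interleaves "" separators into one flat list and relies on a final strip(); B first strips all lines, then segments them into contiguous non-blank runs with an index-based two-level scan, joins each run into a block and joins blocks with '\n\n'.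
import Mathlib
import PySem

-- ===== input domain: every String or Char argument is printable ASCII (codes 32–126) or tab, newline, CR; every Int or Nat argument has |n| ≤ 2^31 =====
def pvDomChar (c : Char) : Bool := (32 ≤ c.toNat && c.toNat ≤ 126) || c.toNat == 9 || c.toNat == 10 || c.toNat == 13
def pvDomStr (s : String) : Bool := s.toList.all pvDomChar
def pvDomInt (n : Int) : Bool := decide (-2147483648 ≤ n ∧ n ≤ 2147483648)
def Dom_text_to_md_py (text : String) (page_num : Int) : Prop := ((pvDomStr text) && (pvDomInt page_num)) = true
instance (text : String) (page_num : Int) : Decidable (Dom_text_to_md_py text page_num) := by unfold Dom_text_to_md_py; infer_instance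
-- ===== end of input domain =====

-- B replaces A's one-pass state machine (flat list with "" separators + final strip) by
-- strip-all-lines, segment into non-blank runs, join runs with "\n" and blocks with "\n\n";
-- same return value, alternative decomposition (not claimed faster).

-- ===== PORT A =====
def text_to_md_py (text : String) (page_num : Int) : String :=
  let lines := PySem.Str.splitlines text
  let cleaned := lines.foldl (fun cleaned line =>
      let stripped := PySem.Str.strip line
      if stripped ≠ "" then cleaned ++ [stripped]
      else if cleaned ≠ [] ∧ cleaned.getLast? ≠ some "" then cleaned ++ [""]
      else cleaned) ([] : List String)
  let body := PySem.Str.strip (PySem.Str.join "\n" cleaned)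
  "## 第 " ++ PySem.Int.toStr page_num ++ " 页\n\n" ++ body

-- ===== PORT B =====
-- the two-level index scan of Source B: outer loop skips blank lines, inner loop (takeWhile/
-- dropWhile = the j-scan over lines[i:j]) collects one contiguous non-blank run as a block
def pvBlocks : List String → List String
  | [] => []
  | l :: rest =>
    if l = "" then pvBlocks rest
    else PySem.Str.join "\n" (l :: rest.takeWhile (· ≠ "")) ::
         pvBlocks (rest.dropWhile (· ≠ ""))
termination_by ls => ls.length
decreasing_by
  · simp
  · have := List.length_dropWhile_le (fun s => decide (s ≠ "")) rest
    simp only [List.length_cons]; omega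

def text_to_md_py_alt (text : String) (page_num : Int) : String :=
  let lines := (PySem.Str.splitlines text).map PySem.Str.strip
  let blocks := pvBlocks lines
  "## 第 " ++ PySem.Int.toStr page_num ++ " 页\n\n" ++ PySem.Str.join "\n\n" blocks

-- ===== PRECONDITION & SPEC =====
def Spec_text_to_md_py (text : String) (page_num : Int) (out : String) : Prop := out = text_to_md_py_alt text page_num
instance (text : String) (page_num : Int) (out : String) : Decidable (Spec_text_to_md_py text page_num out) := by unfold Spec_text_to_md_py; infer_instance

-- ===== CLAIM (what is proved, stated in full; the proofs are below) =====
def Claim_equal_text_to_md_py : Prop := ∀ (text : String) (page_num : Int), Dom_text_to_md_py text page_num → Spec_text_to_md_py text page_num (text_to_md_py text page_num)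

-- ===== LEMMAS AND PROOFS =====

-- chars-level mirror of A's accumulator loop, as a two-flag state machine:
-- b = "last appended element is the empty separator", s = "cleaned is nonempty"
def pvCs (b s : Bool) : List (List Char) → List (List Char)
  | [] => []
  | l :: ls =>
    if l ≠ [] then l :: pvCs false true ls
    else if s && !b then [] :: pvCs true true ls
    else pvCs b s ls

-- chars-level mirror of B's block segmentation
def pvGC : List (List Char) → List (List Char)
  | [] => []
  | l :: rest =>
    if l = [] then pvGC rest
    else PySem.Chars.join ['\n'] (l :: rest.takeWhile (· ≠ [])) ::
         pvGC (rest.dropWhile (· ≠ []))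
termination_by ls => ls.length
decreasing_by
  · simp
  · have := List.length_dropWhile_le (fun s : List Char => decide (s ≠ [])) rest
    simp only [List.length_cons]; omega

-- a stripped line: no leading and no trailing whitespace character
def pvGood (l : List Char) : Prop :=
  (∀ h, l.head? = some h → PySem.Chars.isspace h = false) ∧
  (∀ h, l.getLast? = some h → PySem.Chars.isspace h = false)

def pvFlat (sep : List Char) (ls : List (List Char)) : List Char := (ls.map (sep ++ ·)).flatten

theorem pvJoin_eq_head_flat (sep : List Char) (x : List Char) (xs : List (List Char)) :
    PySem.Chars.join sep (x :: xs) = x ++ pvFlat sep xs := by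
  induction xs generalizing x with
  | nil => simp [PySem.Chars.join_singleton, pvFlat]
  | cons y ys ih =>
      rw [PySem.Chars.join_cons_cons, ih]
      simp [pvFlat, List.append_assoc]

theorem pvFlat_append (sep : List Char) (u v : List (List Char)) :
    pvFlat sep (u ++ v) = pvFlat sep u ++ pvFlat sep v := by
  simp [pvFlat]

theorem pvRstrip_append (a x : List Char) :
    PySem.Chars.rstrip (a ++ x) =
      if PySem.Chars.rstrip x = [] then PySem.Chars.rstrip a else a ++ PySem.Chars.rstrip x := by
  simp only [PySem.Chars.rstrip, List.reverse_append, List.dropWhile_append]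
  cases hx : List.dropWhile PySem.Chars.isspace x.reverse with
  | nil => simp
  | cons c t => simp [List.reverse_append]

theorem pvLstrip_nop (x : List Char) (h : ∀ c, x.head? = some c → PySem.Chars.isspace c = false) :
    PySem.Chars.lstrip x = x := by
  cases x with
  | nil => rfl
  | cons c t => simp [PySem.Chars.lstrip, h c rfl]

theorem pvRstrip_nop (x : List Char) (h : ∀ c, x.getLast? = some c → PySem.Chars.isspace c = false) :
    PySem.Chars.rstrip x = x := by
  unfold PySem.Chars.rstrip
  cases hx : x.reverse with
  | nil => simp_all [List.reverse_eq_nil_iff]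
  | cons c t =>
      have hc : x.getLast? = some c := by rw [← List.head?_reverse, hx]; rfl
      rw [List.dropWhile_cons]
      simp [h c hc, ← hx]

theorem pvHead?_dropWhile (p : α → Bool) (l : List α) (a : α)
    (h : (l.dropWhile p).head? = some a) : p a = false := by
  induction l with
  | nil => simp at h
  | cons x t ih =>
      rw [List.dropWhile_cons] at h
      by_cases hx : p x
      · simp [hx] at h; exact ih h
      · simp [hx] at h; simpa [← h] using hx

theorem pvGood_strip (raw : List Char) : pvGood (PySem.Chars.strip raw) := by
  constructor
  · intro c hc
    unfold PySem.Chars.strip PySem.Chars.rstrip at hc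
    -- rstrip is a prefix of its argument, so the head char is the head of lstrip raw
    have hpre : ((PySem.Chars.lstrip raw).reverse.dropWhile PySem.Chars.isspace).reverse <+: (PySem.Chars.lstrip raw) := by
      have h0 : (PySem.Chars.lstrip raw).reverse.dropWhile PySem.Chars.isspace <:+ (PySem.Chars.lstrip raw).reverse :=
        List.dropWhile_suffix _
      have := List.reverse_prefix.mpr h0
      simpa using this
    obtain ⟨t, ht⟩ := hpre
    have hfirst : (PySem.Chars.lstrip raw).head? = some c := by
      rw [← ht, List.head?_append, hc]
      rfl
    exact pvHead?_dropWhile _ _ _ (by simpa [PySem.Chars.lstrip] using hfirst)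
  · intro c hc
    unfold PySem.Chars.strip PySem.Chars.rstrip at hc
    rw [← List.head?_reverse, List.reverse_reverse] at hc
    exact pvHead?_dropWhile _ _ _ hc

-- === A's fold is pvCs ===

def pvStepC (c : List (List Char)) (l : List Char) : List (List Char) :=
  if l ≠ [] then c ++ [l] else if c ≠ [] ∧ c.getLast? ≠ some [] then c ++ [[]] else c

theorem pvCs_cons_content (b s : Bool) (l : List Char) (ls : List (List Char)) (hl : l ≠ []) :
    pvCs b s (l :: ls) = l :: pvCs false true ls := by
  simp [pvCs, hl]

theorem pvCs_cons_blank_emit (ls : List (List Char)) :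
    pvCs false true ([] :: ls) = [] :: pvCs true true ls := by
  simp [pvCs]

theorem pvCs_cons_blank_skip (b s : Bool) (ls : List (List Char)) (h : (s && !b) = false) :
    pvCs b s ([] :: ls) = pvCs b s ls := by
  simp [pvCs, h]

theorem pvFoldl_eq_cs (ls : List (List Char)) (acc : List (List Char)) :
    ls.foldl pvStepC acc =
      acc ++ pvCs (decide (acc.getLast? = some [])) (decide (acc ≠ [])) ls := by
  induction ls generalizing acc with
  | nil => simp [pvCs]
  | cons l t ih =>
      rw [List.foldl_cons]
      by_cases hl : l = []
      · subst hl
        by_cases hcond : acc ≠ [] ∧ acc.getLast? ≠ some []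
        · have hstep : pvStepC acc [] = acc ++ [[]] := by simp [pvStepC, hcond]
          rw [hstep, ih]
          have h1 : (acc ++ [([] : List Char)]).getLast? = some [] := List.getLast?_concat
          have h2 : acc ++ [([] : List Char)] ≠ [] := by simp
          have hb : decide (acc.getLast? = some ([] : List Char)) = false := by
            simp [hcond.2]
          have hs : decide (acc ≠ []) = true := by simp [hcond.1]
          rw [h1, hb, hs]
          simp only [decide_true]
          rw [pvCs_cons_blank_emit]
          simp [h2]
        · have hstep : pvStepC acc [] = acc := by simp [pvStepC, hcond]
          rw [hstep, ih]
          congr 1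
          rw [pvCs_cons_blank_skip]
          rw [not_and_or] at hcond
          rcases hcond with h | h
          · have : acc = [] := by simpa using h
            subst this; simp
          · have : acc.getLast? = some [] := by simpa using h
            simp [this]
      · have hstep : pvStepC acc l = acc ++ [l] := by simp [pvStepC, hl]
        rw [hstep, ih]
        have h1 : (acc ++ [l]).getLast? = some l := List.getLast?_concat
        have h2 : acc ++ [l] ≠ [] := by simp
        rw [h1]
        have hb : decide (some l = some ([] : List Char)) = false := by simp [hl]
        rw [hb, pvCs_cons_content _ _ _ _ hl]
        simp [h2]

-- === state-normalisation lemmas ===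

theorem pvCs_ff_eq_tt (ls : List (List Char)) : pvCs false false ls = pvCs true true ls := by
  induction ls with
  | nil => rfl
  | cons l t ih =>
      by_cases hl : l = []
      · subst hl; simp [pvCs, ih]
      · simp [pvCs, hl]

theorem pvCs_tt_eq (ls : List (List Char)) :
    pvCs true true ls = pvCs false true (ls.dropWhile (· = [])) := by
  induction ls with
  | nil => rfl
  | cons l t ih =>
      by_cases hl : l = []
      · subst hl
        rw [show pvCs true true ([] :: t) = pvCs true true t by simp [pvCs]]
        rw [ih, List.dropWhile_cons]
        simp
  -- content head: dropWhile stops immediately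
      · rw [pvCs_cons_content _ _ _ _ hl, List.dropWhile_cons]
        simp [hl, pvCs_cons_content _ _ _ _ hl]

theorem pvCs_run (tw dw : List (List Char)) (h : ∀ l ∈ tw, l ≠ []) :
    pvCs false true (tw ++ dw) = tw ++ pvCs false true dw := by
  induction tw with
  | nil => simp
  | cons l t ih =>
      have hl := h l (by simp)
      simp only [List.cons_append]
      rw [show pvCs false true (l :: (t ++ dw)) = l :: pvCs false true (t ++ dw) by
        simp [pvCs, hl]]
      rw [ih (fun x hx => h x (by simp [hx]))]

theorem pvGC_dropWhile (ls : List (List Char)) :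
    pvGC ls = pvGC (ls.dropWhile (· = [])) := by
  induction ls with
  | nil => rfl
  | cons l t ih =>
      by_cases hl : l = []
      · subst hl
        rw [show pvGC ([] :: t) = pvGC t from by rw [pvGC]; simp, ih, List.dropWhile_cons]
        simp
      · rw [List.dropWhile_cons]; simp [hl]

-- === the joined run of a non-blank block is rstrip-invariant and nonempty ===

theorem pvJoin_run_nonnil (l : List Char) (tw : List (List Char)) (hl : l ≠ []) :
    PySem.Chars.join ['\n'] (l :: tw) ≠ [] := by
  rw [pvJoin_eq_head_flat]
  simp [hl]

theorem pvRstrip_join_run (l : List Char) (tw : List (List Char))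
    (h : ∀ x ∈ l :: tw, x ≠ [] ∧ pvGood x) :
    PySem.Chars.rstrip (PySem.Chars.join ['\n'] (l :: tw)) = PySem.Chars.join ['\n'] (l :: tw) := by
  induction tw generalizing l with
  | nil =>
      obtain ⟨hne, hg⟩ := h l (by simp)
      rw [PySem.Chars.join_singleton]
      exact pvRstrip_nop _ hg.2
  | cons y ys ih =>
      rw [PySem.Chars.join_cons_cons, pvRstrip_append]
      have hy := ih y (fun x hx => h x (by simpa using Or.inr hx))
      rw [hy]
      have : PySem.Chars.join ['\n'] (y :: ys) ≠ [] :=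
        pvJoin_run_nonnil _ _ (h y (by simp)).1
      simp [this]

theorem pvFlat_eq_nil_iff (sep : List Char) (hsep : sep ≠ []) (bs : List (List Char)) :
    pvFlat sep bs = [] ↔ bs = [] := by
  cases bs with
  | nil => simp [pvFlat]
  | cons b t => simp [pvFlat, hsep]

-- === small equation lemmas for the well-founded definitions ===

theorem pvGC_nil : pvGC [] = [] := by rw [pvGC]

theorem pvGC_cons_blank (r : List (List Char)) : pvGC ([] :: r) = pvGC r := by
  rw [pvGC]; simp

theorem pvGC_cons_content (x : List Char) (r : List (List Char)) (hx : x ≠ []) :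
    pvGC (x :: r) = PySem.Chars.join ['\n'] (x :: r.takeWhile (· ≠ [])) ::
      pvGC (r.dropWhile (· ≠ [])) := by
  rw [pvGC]; simp [hx]

theorem pvFlat_cons (sep b : List Char) (bs : List (List Char)) :
    pvFlat sep (b :: bs) = sep ++ b ++ pvFlat sep bs := by
  simp [pvFlat]

theorem pvJoin_append_flat (sep x : List Char) (tw v : List (List Char)) :
    PySem.Chars.join sep ((x :: tw) ++ v) = PySem.Chars.join sep (x :: tw) ++ pvFlat sep v := by
  rw [List.cons_append, pvJoin_eq_head_flat, pvJoin_eq_head_flat, pvFlat_append]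
  simp [List.append_assoc]

-- === the core lemma: A's tail, flattened with single separators, rstrips to B's blocks ===
-- part 1: blank-headed (or empty) tails give "\n\n"-prefixed blocks;
-- part 2: content-headed tails give "\n" + the "\n\n"-joined blocks.

theorem pvMainAll (n : ℕ) : ∀ ls : List (List Char), ls.length ≤ n → (∀ l ∈ ls, pvGood l) →
    ((ls = [] ∨ ls.head? = some []) →
      PySem.Chars.rstrip (pvFlat ['\n'] (pvCs false true ls)) = pvFlat ['\n', '\n'] (pvGC ls)) ∧
    (∀ x rr, ls = x :: rr → x ≠ [] →
      PySem.Chars.rstrip (pvFlat ['\n'] (pvCs false true ls)) =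
        '\n' :: PySem.Chars.join ['\n', '\n'] (pvGC ls)) := by
  induction n with
  | zero =>
      intro ls hn hg
      have hls : ls = [] := List.eq_nil_of_length_eq_zero (by omega)
      subst hls
      constructor
      · intro _; simp [pvCs, pvGC_nil, pvFlat, PySem.Chars.rstrip]
      · intro x rr h; simp at h
  | succ n ih =>
      intro ls hn hg
      cases ls with
      | nil =>
          constructor
          · intro _; simp [pvCs, pvGC_nil, pvFlat, PySem.Chars.rstrip]
          · intro x rr h; simp at h
      | cons l r =>
          constructor
          · -- part 1: l must be []
            intro hh
            have hl : l = [] := by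
              rcases hh with h | h
              · simp at h
              · simpa using h
            subst hl
            rw [pvCs_cons_blank_emit, pvCs_tt_eq, pvGC_cons_blank, pvGC_dropWhile r]
            rw [pvFlat_cons, List.append_nil]
            cases hcase : r.dropWhile (· = []) with
            | nil =>
                simp [pvCs, pvGC_nil, pvFlat]
                decide
            | cons x rr =>
                have hx : x ≠ [] := by
                  intro hxe
                  have := pvHead?_dropWhile (fun s : List Char => decide (s = [])) r x
                    (by rw [hcase]; rfl)
                  simp [hxe] at this
                have hlen : (x :: rr).length ≤ n := by
                  have h1 : (r.dropWhile (· = [])).length ≤ r.length :=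
                    List.length_dropWhile_le _ _
                  rw [hcase] at h1
                  simp only [List.length_cons] at h1 hn ⊢
                  omega
                have hgood : ∀ l ∈ x :: rr, pvGood l := by
                  intro l hl
                  refine hg l ?_
                  have : l ∈ r.dropWhile (· = []) := by rw [hcase]; exact hl
                  exact List.mem_cons_of_mem _ ((List.dropWhile_sublist _).mem this)
                have h2 := (ih (x :: rr) hlen hgood).2 x rr rfl hx
                rw [show ['\n'] ++ pvFlat ['\n'] (pvCs false true (x :: rr))
                    = ('\n' : Char) :: pvFlat ['\n'] (pvCs false true (x :: rr)) from rfl]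
                rw [show ('\n' : Char) :: pvFlat ['\n'] (pvCs false true (x :: rr))
                    = ['\n'] ++ pvFlat ['\n'] (pvCs false true (x :: rr)) from rfl]
                rw [pvRstrip_append, h2]
                rw [if_neg (by simp)]
                -- RHS: pvGC (x :: rr) is nonempty, so pvFlat adds the second newline
                rw [pvGC_cons_content _ _ hx, pvFlat_cons, pvJoin_eq_head_flat]
                simp
          · -- part 2: content head
            intro x rr hls hx0
            have hlne : l ≠ [] := by
              injection hls with h1 _
              rw [h1]; exact hx0
            clear hls hx0
            have hsplit : r = r.takeWhile (· ≠ []) ++ r.dropWhile (· ≠ []) :=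
              (List.takeWhile_append_dropWhile).symm
            have htwne : ∀ y ∈ r.takeWhile (· ≠ []), y ≠ [] := by
              intro y hy; simpa using List.mem_takeWhile_imp hy
            have hcsrun : pvCs false true (l :: r)
                = (l :: r.takeWhile (· ≠ [])) ++ pvCs false true (r.dropWhile (· ≠ [])) := by
              rw [pvCs_cons_content _ _ _ _ hlne]
              conv_lhs => rw [hsplit]
              rw [pvCs_run _ _ htwne]
              rfl
            have hgood_run : ∀ y ∈ l :: r.takeWhile (· ≠ []), y ≠ [] ∧ pvGood y := by
              intro y hy
              rcases List.mem_cons.mp hy with h | h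
              · rw [h]; exact ⟨hlne, hg l (by simp)⟩
              · exact ⟨htwne y h, hg y (List.mem_cons_of_mem _ ((List.takeWhile_sublist _).mem h))⟩
            have hdwh : r.dropWhile (· ≠ []) = [] ∨ (r.dropWhile (· ≠ [])).head? = some [] := by
              cases hdwc : r.dropWhile (· ≠ []) with
              | nil => exact Or.inl rfl
              | cons z zz =>
                  right
                  have hz := pvHead?_dropWhile (fun s : List Char => decide (s ≠ [])) r z
                    (by rw [hdwc]; rfl)
                  simp at hz
                  rw [hz]; rfl
            have hdwgood : ∀ y ∈ r.dropWhile (· ≠ []), pvGood y := fun y hy =>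
              hg y (List.mem_cons_of_mem _ ((List.dropWhile_sublist _).mem hy))
            have hdwlen : (r.dropWhile (· ≠ [])).length ≤ n := by
              have h1 : (r.dropWhile (· ≠ [])).length ≤ r.length := List.length_dropWhile_le _ _
              simp only [List.length_cons] at hn
              omega
            have hIH := (ih (r.dropWhile (· ≠ [])) hdwlen hdwgood).1 hdwh
            rw [hcsrun, pvFlat_append]
            rw [show pvFlat ['\n'] (l :: r.takeWhile (· ≠ []))
                = ['\n'] ++ PySem.Chars.join ['\n'] (l :: r.takeWhile (· ≠ [])) by
              rw [pvFlat_cons, pvJoin_eq_head_flat]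
              simp]
            rw [pvRstrip_append, hIH]
            conv_rhs => rw [pvGC_cons_content _ _ hlne, pvJoin_eq_head_flat ['\n', '\n']]
            by_cases hnil : pvGC (r.dropWhile (· ≠ [])) = []
            · rw [hnil, if_pos (by simp [pvFlat])]
              rw [pvRstrip_append, pvRstrip_join_run _ _ hgood_run,
                if_neg (pvJoin_run_nonnil _ _ hlne)]
              simp [pvFlat]
            · rw [if_neg (by
                rw [pvFlat_eq_nil_iff _ (by simp)]
                exact hnil)]
              simp

-- === cleaned characterised + the top-level chars equality ===

theorem pvMainChars (ls : List (List Char)) (hg : ∀ l ∈ ls, pvGood l) :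
    PySem.Chars.strip (PySem.Chars.join ['\n'] (ls.foldl pvStepC [])) =
      PySem.Chars.join ['\n', '\n'] (pvGC ls) := by
  rw [pvFoldl_eq_cs]
  simp only [List.nil_append]
  rw [show (decide (([] : List (List Char)).getLast? = some [])) = false from rfl]
  rw [show (decide (([] : List (List Char)) ≠ [])) = false from rfl]
  rw [pvCs_ff_eq_tt, pvCs_tt_eq, pvGC_dropWhile]
  have hg' : ∀ l ∈ ls.dropWhile (· = []), pvGood l := fun l hx =>
    hg l ((List.dropWhile_sublist _).mem hx)
  cases hcase : ls.dropWhile (· = []) with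
  | nil =>
      simp [pvCs, pvGC_nil, PySem.Chars.join, PySem.Chars.strip, PySem.Chars.lstrip,
        PySem.Chars.rstrip]
      decide
  | cons x rr =>
      rw [hcase] at hg'
      have hx : x ≠ [] := by
        intro hxe
        have := pvHead?_dropWhile (fun s : List Char => decide (s = [])) ls x
          (by rw [hcase]; rfl)
        simp [hxe] at this
      have hsplit : rr = rr.takeWhile (· ≠ []) ++ rr.dropWhile (· ≠ []) :=
        (List.takeWhile_append_dropWhile).symm
      have htwne : ∀ y ∈ rr.takeWhile (· ≠ []), y ≠ [] := by
        intro y hy; simpa using List.mem_takeWhile_imp hy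
      have hcsrun : pvCs false true (x :: rr)
          = (x :: rr.takeWhile (· ≠ [])) ++ pvCs false true (rr.dropWhile (· ≠ [])) := by
        rw [pvCs_cons_content _ _ _ _ hx]
        conv_lhs => rw [hsplit]
        rw [pvCs_run _ _ htwne]
        rfl
      have hgood_run : ∀ y ∈ x :: rr.takeWhile (· ≠ []), y ≠ [] ∧ pvGood y := by
        intro y hy
        rcases List.mem_cons.mp hy with h | h
        · rw [h]; exact ⟨hx, hg' x (by simp)⟩
        · exact ⟨htwne y h, hg' y (List.mem_cons_of_mem _ ((List.takeWhile_sublist _).mem h))⟩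
      have hdwh : rr.dropWhile (· ≠ []) = [] ∨ (rr.dropWhile (· ≠ [])).head? = some [] := by
        cases hdwc : rr.dropWhile (· ≠ []) with
        | nil => exact Or.inl rfl
        | cons z zz =>
            right
            have hz := pvHead?_dropWhile (fun s : List Char => decide (s ≠ [])) rr z
              (by rw [hdwc]; rfl)
            simp at hz
            rw [hz]; rfl
      have hdwgood : ∀ l ∈ rr.dropWhile (· ≠ []), pvGood l := fun l hx2 =>
        hg' l (List.mem_cons_of_mem _ ((List.dropWhile_sublist _).mem hx2))
      have hIH := (pvMainAll (rr.dropWhile (· ≠ [])).length _ le_rfl hdwgood).1 hdwh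
      rw [hcsrun, pvJoin_append_flat]
      unfold PySem.Chars.strip
      rw [pvLstrip_nop]
      · rw [pvRstrip_append, hIH]
        conv_rhs => rw [pvGC_cons_content _ _ hx, pvJoin_eq_head_flat ['\n', '\n']]
        by_cases hnil : pvGC (rr.dropWhile (· ≠ [])) = []
        · rw [hnil, if_pos (by simp [pvFlat])]
          rw [pvRstrip_join_run _ _ hgood_run]
          simp [pvFlat]
        · rw [if_neg (by
            rw [pvFlat_eq_nil_iff _ (by simp)]
            exact hnil)]
      · -- head of the whole body is the head of x, which is not whitespace
        intro c hc
        have hxg : pvGood x := (hgood_run x (by simp)).2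
        apply hxg.1 c
        rw [pvJoin_eq_head_flat, List.head?_append, List.head?_append] at hc
        cases hhx : x.head? with
        | none => simp [List.head?_eq_none_iff.mp hhx] at hx
        | some d => rw [hhx] at hc; simp at hc; rw [hc]

-- === bridges between the String-level ports and the chars level ===

theorem pvFoldl_bridge (lines : List String) (acc : List String) :
    List.map String.toList (lines.foldl (fun cleaned line =>
      let stripped := PySem.Str.strip line
      if stripped ≠ "" then cleaned ++ [stripped]
      else if cleaned ≠ [] ∧ cleaned.getLast? ≠ some "" then cleaned ++ [""]
      else cleaned) acc) =
    (lines.map String.toList).foldl (fun c l => pvStepC c (PySem.Chars.strip l)) (acc.map String.toList) := by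
  induction lines generalizing acc with
  | nil => simp
  | cons line t ih =>
      rw [List.foldl_cons, List.map_cons, List.foldl_cons, ih]
      congr 1
      have hstr : (PySem.Str.strip line).toList = PySem.Chars.strip line.toList :=
        PySem.Str.toList_strip line
      have hiff : PySem.Str.strip line = "" ↔ PySem.Chars.strip line.toList = [] := by
        rw [← hstr, String.toList_eq_nil_iff]
      have hiff3 : acc.getLast? = some "" ↔ (List.map String.toList acc).getLast? = some [] := by
        rw [List.getLast?_map]
        constructor
        · intro h; rw [h]; rfl
        · intro h
          rcases Option.map_eq_some_iff.mp h with ⟨s, hs, hsl⟩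
          rw [hs]
          congr
          exact String.toList_inj.mp (by rw [hsl]; rfl)
      simp only [pvStepC]
      split_ifs with h1 h2 h3 h4 h5 h6 <;>
        simp_all

theorem pvBlocks_bridge (ls : List String) :
    List.map String.toList (pvBlocks ls) = pvGC (ls.map String.toList) := by
  induction hls : ls.length using Nat.strong_induction_on generalizing ls with
  | _ n ih =>
      cases ls with
      | nil =>
          rw [show pvBlocks ([] : List String) = [] from by rw [pvBlocks]]
          simp [pvGC_nil]
      | cons l rest =>
          subst hls
          by_cases hl : l = ""
          · subst hl
            rw [show pvBlocks ("" :: rest) = pvBlocks rest by rw [pvBlocks]; simp]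
            rw [List.map_cons]
            rw [show pvGC (("" : String).toList :: rest.map String.toList)
                = pvGC (rest.map String.toList) by rw [pvGC]; simp]
            exact ih rest.length (by simp) rest rfl
          · have hl' : l.toList ≠ [] := by simpa [String.toList_eq_nil_iff] using hl
            rw [show pvBlocks (l :: rest)
                = PySem.Str.join "\n" (l :: rest.takeWhile (· ≠ "")) ::
                  pvBlocks (rest.dropWhile (· ≠ "")) by rw [pvBlocks]; simp [hl]]
            rw [List.map_cons, List.map_cons]
            rw [show pvGC (l.toList :: rest.map String.toList)
                = PySem.Chars.join ['\n'] (l.toList :: (rest.map String.toList).takeWhile (· ≠ [])) ::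
                  pvGC ((rest.map String.toList).dropWhile (· ≠ [])) by
              rw [pvGC]; simp [hl']]
            have hfun : ((fun x : List Char => decide (x ≠ [])) ∘ String.toList)
                = (fun s : String => decide (s ≠ "")) := by
              funext s; simp [String.toList_eq_nil_iff]
            have htwm : (rest.map String.toList).takeWhile (· ≠ [])
                = (rest.takeWhile (· ≠ "")).map String.toList := by
              rw [List.takeWhile_map, hfun]
            have hdwm : (rest.map String.toList).dropWhile (· ≠ [])
                = (rest.dropWhile (· ≠ "")).map String.toList := by
              rw [List.dropWhile_map, hfun]
            rw [htwm, hdwm]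
            congr 1
            · rw [PySem.Str.toList_join]
              simp
            · exact ih (rest.dropWhile (· ≠ "")).length
                (by
                  have := List.length_dropWhile_le (fun s : String => decide (s ≠ "")) rest
                  simp only [List.length_cons]; omega)
                _ rfl

-- ===== VERDICT (by name: the statement is the Claim_ definition above) =====
theorem text_to_md_py_spec : Claim_equal_text_to_md_py := by
  intro text page_num _
  unfold Spec_text_to_md_py text_to_md_py text_to_md_py_alt
  simp only []
  have hbody :
      PySem.Str.strip (PySem.Str.join "\n" ((PySem.Str.splitlines text).foldl (fun cleaned line =>
        let stripped := PySem.Str.strip line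
        if stripped ≠ "" then cleaned ++ [stripped]
        else if cleaned ≠ [] ∧ cleaned.getLast? ≠ some "" then cleaned ++ [""]
        else cleaned) [])) =
      PySem.Str.join "\n\n" (pvBlocks ((PySem.Str.splitlines text).map PySem.Str.strip)) := by
    rw [← String.toList_inj]
    rw [show (PySem.Str.strip (PySem.Str.join "\n" ((PySem.Str.splitlines text).foldl _ []))).toList
        = PySem.Chars.strip ((PySem.Str.join "\n" ((PySem.Str.splitlines text).foldl (fun cleaned line =>
            let stripped := PySem.Str.strip line
            if stripped ≠ "" then cleaned ++ [stripped]
            else if cleaned ≠ [] ∧ cleaned.getLast? ≠ some "" then cleaned ++ [""]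
            else cleaned) [])).toList) from PySem.Str.toList_strip _]
    rw [PySem.Str.toList_join, PySem.Str.toList_join]
    rw [pvFoldl_bridge _ []]
    rw [pvBlocks_bridge]
    have hms : ((PySem.Str.splitlines text).map PySem.Str.strip).map String.toList
        = (PySem.Chars.splitlines text.toList).map PySem.Chars.strip := by
      rw [List.map_map, ← PySem.Str.splitlines_map_toList, List.map_map]
      congr 1
      funext s
      exact PySem.Str.toList_strip s
    rw [hms]
    have hms2 : (PySem.Str.splitlines text).map String.toList = PySem.Chars.splitlines text.toList :=
      PySem.Str.splitlines_map_toList text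
    rw [hms2]
    simp only [List.map_nil]
    rw [show ("\n" : String).toList = ['\n'] from rfl, show ("\n\n" : String).toList = ['\n', '\n'] from rfl]
    rw [show (PySem.Chars.splitlines text.toList).foldl (fun c l => pvStepC c (PySem.Chars.strip l)) [] =
        ((PySem.Chars.splitlines text.toList).map PySem.Chars.strip).foldl pvStepC [] from by
      rw [List.foldl_map]]
    exact pvMainChars _ (fun l hl => by
      rcases List.mem_map.mp hl with ⟨raw, _, hraw⟩
      rw [← hraw]
      exact pvGood_strip raw)
  rw [hbody]
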